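-- pv_equiv track=rewrite | github.com/Wizmann/ACM-ICPC | HackerRank/Mathematics/Combinatorics/Picking Cards.py | solve
-- ===== SOURCE A (Python) =====
-- MOD = (10 ** 9) + 7
--
-- def solve(c):
--     c.sort()
--     n = len(c)
--
--     res = 1
--
--     l, r = 0, 0
--     while l < n:
--         while r < n and c[r] <= l:
--             r += 1
--         res *= r - l
--         res %= MOD
--         l += 1
--     return res
-- ===== SOURCE B (Python) =====
-- MOD = (10 ** 9) + 7
--
-- def solve(c):
--     n = len(c)
--     hist = {}
--     for v in c:
--         k = 0 if v < 0 else (n if v > n else v)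
--         hist[k] = hist.get(k, 0) + 1
--     res = 1
--     cnt = 0
--     for l in range(n):
--         cnt += hist.get(l, 0)
--         res = res * (cnt - l) % MOD
--     return res
-- ===== Notes on version B (the rewrite author's own statement) =====
-- stated objective: faster
-- what changed: Replaces sort + two-pointer sweep by a one-pass histogram of values clamped to [0,n] and a prefix-count scan, so no sorting is needed.
import Mathlib
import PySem

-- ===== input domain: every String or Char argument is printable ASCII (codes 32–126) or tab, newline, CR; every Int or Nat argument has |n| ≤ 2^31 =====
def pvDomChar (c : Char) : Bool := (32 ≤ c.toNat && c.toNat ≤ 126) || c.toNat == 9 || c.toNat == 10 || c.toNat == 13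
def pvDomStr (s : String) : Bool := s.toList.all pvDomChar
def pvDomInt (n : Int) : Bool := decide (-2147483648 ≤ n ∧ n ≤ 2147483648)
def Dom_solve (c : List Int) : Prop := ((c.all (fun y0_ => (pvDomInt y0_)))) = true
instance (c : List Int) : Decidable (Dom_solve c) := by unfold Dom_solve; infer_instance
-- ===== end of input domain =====

-- B replaces A's sort + two-pointer sweep by a clamped-value histogram with a prefix-count
-- scan (objective: faster). Equivalence is about the RETURN value only: Python A sorts the
-- caller's list in place, B does not mutate its argument.

def pvMOD : Int := 10 ^ 9 + 7

-- ===== PORT A =====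
-- inner while: advance r while r < n and c[r] <= l  (the r < n guard keeps the index in range, so getD is exact)
def solveInner (cs : List Int) (n l r : Nat) : Nat :=
  if h1 : r < n ∧ cs.getD r 0 ≤ (l : Int) then solveInner cs n l (r + 1) else r
  termination_by n - r
  decreasing_by omega

-- outer while over l, carrying r and res
def solveOuter (cs : List Int) (n l r : Nat) (res : Int) : Int :=
  if l < n then
    let r' := solveInner cs n l r
    solveOuter cs n (l + 1) r' (PySem.Int.mod (res * ((r' : Int) - (l : Int))) pvMOD)
  else res
  termination_by n - l

def solve (c : List Int) : Int :=
  let cs := PySem.List.sorted c (fun x => x) false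
  solveOuter cs cs.length 0 0 1

-- ===== PORT B =====
-- k = 0 if v < 0 else (n if v > n else v)
def clampB (n : Nat) (v : Int) : Int := if v < 0 then 0 else if v > (n : Int) then (n : Int) else v

def solve_alt (c : List Int) : Int :=
  let n := c.length
  let hist := c.foldl (fun d v => d.insert (clampB n v) (d.getD (clampB n v) 0 + 1))
      (PySem.Dict.empty : PySem.Dict Int Int)
  (((PySem.List.pyRange 0 (n : Int) 1).foldl
      (fun (p : Int × Int) (l : Int) =>
        (p.1 + hist.getD l 0, PySem.Int.mod (p.2 * (p.1 + hist.getD l 0 - l)) pvMOD))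
      ((0 : Int), (1 : Int)))).2

-- ===== PRECONDITION & SPEC =====
def Spec_solve (c : List Int) (out : Int) : Prop := out = solve_alt c
instance (c : List Int) (out : Int) : Decidable (Spec_solve c out) := by unfold Spec_solve; infer_instance

-- ===== CLAIM (what is proved, stated in full; the proofs are below) =====
def Claim_equal_solve : Prop := ∀ (c : List Int), Dom_solve c → Spec_solve c (solve c)

-- ===== LEMMAS AND PROOFS =====

-- the common reference loop: res ← (res * (count(c, ≤ l) - l)) mod MOD over l = 0..n-1
def refStep (c : List Int) (res : Int) (l : Int) : Int :=
  PySem.Int.mod (res * ((c.countP (fun x => decide (x ≤ l)) : Int) - l)) pvMOD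

theorem sorted_getD_le_iff (cs : List Int) (hs : cs.Pairwise (· ≤ ·)) (l : Int) (r : Nat)
    (hr : r < cs.length) :
    (cs.getD r 0 ≤ l ↔ r < cs.countP (fun x => decide (x ≤ l))) := by
  rw [List.getD_eq_getElem cs 0 hr]
  have hpw := List.pairwise_iff_getElem.mp hs
  constructor
  · intro h
    have hsplit : cs.countP (fun x => decide (x ≤ l))
        = (cs.take (r+1)).countP (fun x => decide (x ≤ l))
          + (cs.drop (r+1)).countP (fun x => decide (x ≤ l)) := by
      rw [← List.countP_append, List.take_append_drop]
    have htake : (cs.take (r+1)).countP (fun x => decide (x ≤ l)) = r + 1 := by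
      have hall : ∀ x ∈ cs.take (r+1), (fun x => decide (x ≤ l)) x = true := by
        intro x hx
        obtain ⟨i, hi, hxi⟩ := List.getElem_of_mem hx
        have hi' : i < r + 1 := by
          have := hi; simp [List.length_take] at this; omega
        have hile : cs[i]'(by omega) ≤ cs[r] := by
          rcases Nat.lt_or_ge i r with h' | h'
          · exact hpw i r (by omega) hr h'
          · have : i = r := by omega
            subst this; exact le_refl _
        have : x = cs[i]'(by omega) := by
          rw [← hxi]; exact (List.getElem_take).symm ▸ rfl
        simp [this]; exact le_trans hile h
      rw [List.countP_eq_length.mpr hall, List.length_take]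
      omega
    omega
  · intro h
    by_contra hlt
    push Not at hlt
    have hdrop : (cs.drop r).countP (fun x => decide (x ≤ l)) = 0 := by
      apply List.countP_eq_zero.mpr
      intro x hx
      obtain ⟨i, hi, hxi⟩ := List.getElem_of_mem hx
      have hlen : i + r < cs.length := by simp [List.length_drop] at hi; omega
      have hx' : x = cs[r + i]'(by omega) := by
        rw [← hxi, List.getElem_drop]
      have : cs[r] ≤ cs[r + i]'(by omega) := by
        rcases Nat.eq_zero_or_pos i with h0 | h0
        · subst h0; simp
        · exact hpw r (r + i) hr (by omega) (by omega)
      simp [hx']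
      omega
    have : cs.countP (fun x => decide (x ≤ l)) ≤ r := by
      have hsplit : cs.countP (fun x => decide (x ≤ l))
          = (cs.take r).countP (fun x => decide (x ≤ l))
            + (cs.drop r).countP (fun x => decide (x ≤ l)) := by
        rw [← List.countP_append, List.take_append_drop]
      have := List.countP_le_length (p := fun x => decide (x ≤ l)) (l := cs.take r)
      simp [List.length_take] at this
      omega
    omega

theorem inner_eq (cs : List Int) (hs : cs.Pairwise (· ≤ ·)) (l r : Nat)
    (hr : r ≤ cs.countP (fun x => decide (x ≤ (l : Int)))) :
    solveInner cs cs.length l r = cs.countP (fun x => decide (x ≤ (l : Int))) := by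
  set k := cs.countP (fun x => decide (x ≤ (l : Int))) with hk
  induction hd : k - r generalizing r with
  | zero =>
    have hrk : r = k := by omega
    rw [solveInner, dif_neg]
    · exact hrk
    · rintro ⟨h1, h2⟩
      have := (sorted_getD_le_iff cs hs (l : Int) r h1).mp h2
      omega
  | succ m ih =>
    have hrk : r < k := by omega
    have hkle : k ≤ cs.length := by
      simpa [hk] using List.countP_le_length (p := fun x => decide (x ≤ (l : Int))) (l := cs)
    have h1 : r < cs.length := by omega
    rw [solveInner, dif_pos ⟨h1, (sorted_getD_le_iff cs hs (l : Int) r h1).mpr hrk⟩]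
    exact ih (r + 1) (by omega) (by omega)

theorem outer_eq (cs : List Int) (hs : cs.Pairwise (· ≤ ·)) (l r : Nat) (res : Int)
    (hr : r ≤ cs.countP (fun x => decide (x ≤ (l : Int)))) :
    solveOuter cs cs.length l r res
      = (PySem.List.pyRange (l : Int) (cs.length : Int) 1).foldl (refStep cs) res := by
  induction hd : cs.length - l generalizing l r res with
  | zero =>
    rw [solveOuter, if_neg (by omega : ¬ l < cs.length), PySem.List.pyRange_one_eq_nil (by exact_mod_cast (by omega : cs.length ≤ l))]
    simp
  | succ m ih =>
    have hl : l < cs.length := by omega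
    rw [solveOuter, if_pos hl]
    rw [inner_eq cs hs l r hr]
    rw [PySem.List.pyRange_one_cons (by exact_mod_cast hl)]
    rw [List.foldl_cons]
    have hmono : cs.countP (fun x => decide (x ≤ (l : Int)))
        ≤ cs.countP (fun x => decide (x ≤ ((l + 1 : Nat) : Int))) := by
      apply List.countP_mono_left
      intro x _ h
      simp at h ⊢
      omega
    have := ih (l + 1) (cs.countP (fun x => decide (x ≤ (l : Int))))
      (PySem.Int.mod (res * ((cs.countP (fun x => decide (x ≤ (l : Int))) : Int) - (l : Int))) pvMOD)
      hmono (by omega)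
    rw [this]
    push_cast
    rfl

theorem countP_split (xs : List Int) (l : Int) :
    xs.countP (fun x => decide (x ≤ l)) = xs.countP (fun x => decide (x ≤ l - 1)) + xs.count l := by
  induction xs with
  | nil => simp
  | cons x t ih =>
    rw [List.countP_cons, List.countP_cons, List.count_cons, ih]
    split_ifs with h1 h2 h3 <;> simp only [decide_eq_true_eq, beq_iff_eq] at * <;> omega

theorem clamp_countP (c : List Int) (l : Nat) (hl : l < c.length) :
    (c.map (clampB c.length)).countP (fun x => decide (x ≤ (l : Int)))
      = c.countP (fun x => decide (x ≤ (l : Int))) := by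
  rw [List.countP_map]
  apply List.countP_congr
  intro v _
  simp [Function.comp, clampB]
  split_ifs with h1 h2 <;> constructor <;> intro h <;> omega

theorem hist_getD (c : List Int) (k : Int) :
    (c.foldl (fun d v => d.insert (clampB c.length v) (d.getD (clampB c.length v) 0 + 1))
        (PySem.Dict.empty : PySem.Dict Int Int)).getD k 0
      = (((c.map (clampB c.length)).count k : Int)) := by
  have h := List.foldl_map (f := clampB c.length)
    (g := fun (d : PySem.Dict Int Int) x => d.insert x (d.getD x 0 + 1)) (l := c)
    (init := (PySem.Dict.empty : PySem.Dict Int Int))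
  rw [← h, PySem.Dict.getD_foldl_insert_add_one]
  simp

theorem bloop (c : List Int) (l : Nat) (hl : l ≤ c.length) (res : Int) :
    (((PySem.List.pyRange (l : Int) (c.length : Int) 1).foldl
        (fun (p : Int × Int) (li : Int) =>
          (p.1 + ((c.map (clampB c.length)).count li : Int),
           PySem.Int.mod (p.2 * (p.1 + ((c.map (clampB c.length)).count li : Int) - li)) pvMOD))
        ((((c.map (clampB c.length)).countP (fun x => decide (x ≤ (l : Int) - 1)) : Int)), res))).2
      = (PySem.List.pyRange (l : Int) (c.length : Int) 1).foldl (refStep c) res := by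
  induction hd : c.length - l generalizing l res with
  | zero =>
    rw [PySem.List.pyRange_one_eq_nil (by omega)]
    rfl
  | succ m ih =>
    have hl' : l < c.length := by omega
    rw [PySem.List.pyRange_one_cons (by omega : (l : Int) < (c.length : Int))]
    rw [List.foldl_cons, List.foldl_cons]
    have hcast : ((l : Int) + 1) = (((l + 1 : Nat)) : Int) := by push_cast; ring
    rw [hcast]
    have he : (((l + 1 : Nat) : Int)) - 1 = (l : Int) := by push_cast; ring
    have hS : ((c.map (clampB c.length)).countP (fun x => decide (x ≤ (l : Int) - 1)) : Int)
        + ((c.map (clampB c.length)).count (l : Int) : Int)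
        = ((c.map (clampB c.length)).countP (fun x => decide (x ≤ ((l + 1 : Nat) : Int) - 1)) : Int) := by
      rw [he]
      exact_mod_cast (countP_split (c.map (clampB c.length)) (l : Int)).symm
    rw [hS]
    have hK : ((c.map (clampB c.length)).countP (fun x => decide (x ≤ ((l + 1 : Nat) : Int) - 1)) : Int)
        = (c.countP (fun x => decide (x ≤ (l : Int))) : Int) := by
      rw [he]
      exact_mod_cast clamp_countP c l hl'
    rw [show refStep c res (l : Int)
        = PySem.Int.mod (res * (((c.map (clampB c.length)).countP (fun x => decide (x ≤ ((l + 1 : Nat) : Int) - 1)) : Int) - (l : Int))) pvMOD from by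
      rw [hK]; rfl]
    exact ih (l + 1) (by omega) _ (by omega)

theorem solve_eq_ref (c : List Int) :
    solve c = (PySem.List.pyRange 0 (c.length : Int) 1).foldl (refStep c) 1 := by
  unfold solve
  have hperm : (PySem.List.sorted c (fun x => x) false).Perm c := PySem.List.sorted_perm c (fun x => x) false
  have hs : (PySem.List.sorted c (fun x => x) false).Pairwise (· ≤ ·) := by
    simpa using PySem.List.sorted_pairwise c (fun x => x)
  rw [outer_eq _ hs 0 0 1 (by omega)]
  have hlen : (PySem.List.sorted c (fun x => x) false).length = c.length := hperm.length_eq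
  have hstep : refStep (PySem.List.sorted c (fun x => x) false) = refStep c := by
    funext res l
    unfold refStep
    rw [hperm.countP_eq]
  rw [hlen, hstep]
  norm_num

theorem solve_alt_eq_ref (c : List Int) :
    solve_alt c = (PySem.List.pyRange 0 (c.length : Int) 1).foldl (refStep c) 1 := by
  simp only [solve_alt]
  simp only [hist_getD]
  have h0 : (((c.map (clampB c.length)).countP (fun x => decide (x ≤ (0 : Int) - 1)) : Int)) = 0 := by
    have : (c.map (clampB c.length)).countP (fun x => decide (x ≤ (0 : Int) - 1)) = 0 := by
      apply List.countP_eq_zero.mpr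
      intro x hx
      obtain ⟨v, _, rfl⟩ := List.mem_map.mp hx
      simp [clampB]
      split_ifs <;> omega
    exact_mod_cast this
  have := bloop c 0 (by omega) 1
  simp only [Nat.cast_zero] at this
  rw [h0] at this
  exact this

-- ===== VERDICT (by name: the statement is the Claim_ definition above) =====
theorem solve_spec : Claim_equal_solve := by
  intro c _
  unfold Spec_solve
  rw [solve_eq_ref, solve_alt_eq_ref]
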